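-- pv_equiv track=rewrite | github.com/pinion05/skills | telegram/scripts/telegram_fetch.py | strip_draft_header
-- ===== SOURCE A (Python) =====
-- def strip_draft_header(body: str) -> str:
--     """Strip markdown header ending with '- Telegram Draft' or similar."""
--     lines = body.strip().split('\n')
--
--     if lines and lines[0].startswith('#'):
--         first_line = lines[0]
--         # Remove headers ending with common draft markers
--         if any(marker in first_line.lower() for marker in ['telegram draft', 'draft', '— draft']):
--             # Remove first line and any following empty lines
--             lines = lines[1:]
--             while lines and not lines[0].strip():
--                 lines.pop(0)
--             return '\n'.join(lines)
--
--     return body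
-- ===== SOURCE B (Python) =====
-- def strip_draft_header(body: str) -> str:
--     """Strip markdown header ending with '- Telegram Draft' or similar."""
--     s = body.strip()
--     head, _, rest = s.partition('\n')
--     if not (head.startswith('#') and 'draft' in head.lower()):
--         return body
--     while rest:
--         line, _, tail = rest.partition('\n')
--         if line.strip():
--             break
--         rest = tail
--     return rest
-- ===== Notes on version B (the rewrite author's own statement) =====
-- stated objective: idiomatic
-- what changed: Replaces the split-into-a-list-of-lines plus pop(0) loop with direct string scanning: one partition() isolates the first line for the header test and a partition-based loop peels blank lines off the remaining text, never materialising a line list or re-joining it.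
import Mathlib
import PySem

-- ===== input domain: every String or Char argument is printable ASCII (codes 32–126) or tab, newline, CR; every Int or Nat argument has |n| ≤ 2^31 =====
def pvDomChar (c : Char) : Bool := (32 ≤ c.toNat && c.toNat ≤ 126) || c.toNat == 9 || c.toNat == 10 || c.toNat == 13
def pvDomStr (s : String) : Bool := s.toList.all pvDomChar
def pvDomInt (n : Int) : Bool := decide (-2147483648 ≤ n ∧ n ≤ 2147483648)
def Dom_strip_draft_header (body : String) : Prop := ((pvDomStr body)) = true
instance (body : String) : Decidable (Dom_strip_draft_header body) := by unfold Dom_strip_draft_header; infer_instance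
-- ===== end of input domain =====

-- B replaces A's list-of-lines + pop(0) loop by direct string scanning with partition; objective: idiomatic.


-- ===== PORT A =====
-- 'while lines and not lines[0].strip(): lines.pop(0)' as structural recursion
def pvPopBlank : List (List Char) → List (List Char)
  | [] => []
  | l :: rest => if (PySem.Chars.strip l).isEmpty then pvPopBlank rest else l :: rest

def strip_draft_header (body : String) : String :=
  let lines := PySem.Chars.splitOn (PySem.Chars.strip body.toList) ['\n']
  if lines.isEmpty then body
  else if PySem.Chars.startswith lines.head! ['#'] then
    if ["telegram draft".toList, "draft".toList, "— draft".toList].any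
         (fun m => PySem.Chars.isIn m (PySem.Chars.lower lines.head!)) then
      String.ofList (PySem.Chars.join ['\n'] (pvPopBlank lines.tail))
    else body
  else body

-- ===== PORT B =====
-- Source B's blank-skipping loop over the raw string; rest.partition('\n') is ported by hand as
-- (takeWhile (· != '\n'), dropWhile (· != '\n')).drop 1) — exact for a 1-char separator.
def pvSkipBlankGo : Nat → List Char → List Char
  | _, [] => []
  | 0, t => t
  | fuel+1, c :: cs =>
    if (PySem.Chars.strip ((c :: cs).takeWhile (· != '\n'))).isEmpty then
      pvSkipBlankGo fuel (((c :: cs).dropWhile (· != '\n')).drop 1)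
    else c :: cs

-- fuel = length+1 always suffices: each step drops at least one character
def pvSkipBlank (t : List Char) : List Char := pvSkipBlankGo (t.length + 1) t

def strip_draft_header_alt (body : String) : String :=
  let s := PySem.Chars.strip body.toList
  let head := s.takeWhile (· != '\n')
  let rest := (s.dropWhile (· != '\n')).drop 1
  if PySem.Chars.startswith head ['#'] && PySem.Chars.isIn "draft".toList (PySem.Chars.lower head)
  then String.ofList (pvSkipBlank rest)
  else body

-- ===== PRECONDITION & SPEC =====
def Spec_strip_draft_header (body : String) (out : String) : Prop := out = strip_draft_header_alt body
instance (body : String) (out : String) : Decidable (Spec_strip_draft_header body out) := by unfold Spec_strip_draft_header; infer_instance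

-- ===== CLAIM (what is proved, stated in full; the proofs are below) =====
def Claim_equal_strip_draft_header : Prop := ∀ (body : String), Dom_strip_draft_header body → Spec_strip_draft_header body (strip_draft_header body)

-- ===== LEMMAS AND PROOFS =====

-- reference shape of Python's split('\n')
def pvSplit (t : List Char) : List (List Char) :=
  t.takeWhile (· != '\n') ::
    (if (t.dropWhile (· != '\n')).isEmpty then []
     else pvSplit ((t.dropWhile (· != '\n')).drop 1))
  termination_by t.length
  decreasing_by
    rename_i hne
    have h := List.length_dropWhile_le (fun x => x != '\n') t
    have h2 : t.dropWhile (· != '\n') ≠ [] := by simpa [List.isEmpty_iff] using hne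
    have h3 : t ≠ [] := by intro h'; subst h'; simp at h2
    have h4 : 0 < (t.dropWhile (fun x => x != '\n')).length := List.length_pos_of_ne_nil h2
    have _h5 : 0 < t.length := List.length_pos_of_ne_nil h3
    simp only [List.length_drop]
    omega

def pvConsHead (c : List Char) : List (List Char) → List (List Char)
  | [] => [c]
  | x :: xs => (c ++ x) :: xs

def pvSkipBlankW : List Char → List Char
  | [] => []
  | c :: cs =>
    if (PySem.Chars.strip ((c :: cs).takeWhile (· != '\n'))).isEmpty then
      pvSkipBlankW (((c :: cs).dropWhile (· != '\n')).drop 1)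
    else c :: cs
  termination_by t => t.length
  decreasing_by
    have h := List.length_dropWhile_le (fun x => x != '\n') (c :: cs)
    simp only [List.length_drop, List.length_cons] at *
    omega

theorem pvGo_spec : ∀ (fuel : Nat) (l cur : List Char) (accl : List (List Char)), l.length < fuel →
    PySem.Chars.splitOn.go ['\n'] fuel l cur accl = accl.reverse ++ pvConsHead cur.reverse (pvSplit l) := by
  intro fuel
  induction fuel with
  | zero => intro l cur accl h; omega
  | succ n ih =>
    intro l cur accl h
    cases l with
    | nil =>
      rw [PySem.Chars.splitOn.go, pvSplit]
      · simp [pvConsHead]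
      · omega
    | cons c rest =>
      rw [PySem.Chars.splitOn.go]
      have hrest : rest.length < n := by simpa using Nat.lt_of_succ_lt_succ h
      by_cases hc : c = '\n'
      · subst hc
        have hpre : List.isPrefixOf ['\n'] ('\n' :: rest) = true := by simp [List.isPrefixOf]
        rw [if_pos hpre]
        rw [ih _ [] _ (by simpa using hrest)]
        conv_rhs => rw [pvSplit]
        simp only [List.takeWhile_cons, List.dropWhile_cons]
        norm_num
        rw [pvSplit]
        simp [pvConsHead]
      · have hpre : List.isPrefixOf ['\n'] (c :: rest) = false := by
          simp [List.isPrefixOf]; exact fun h' => hc h'.symm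
        rw [if_neg (by simp [hpre])]
        rw [ih _ (c :: cur) _ hrest]
        conv_rhs => rw [pvSplit]
        conv_lhs => rw [pvSplit]
        simp only [List.takeWhile_cons, List.dropWhile_cons]
        have hcb : (c != '\n') = true := by simpa using hc
        simp [hcb, pvConsHead]

theorem pvSplitOn_eq (t : List Char) :
    PySem.Chars.splitOn t ['\n'] = pvSplit t := by
  show PySem.Chars.splitOn.go _ _ _ _ _ = _
  rw [pvGo_spec (t.length + 1) t [] [] (by omega)]
  conv_rhs => rw [pvSplit]
  rw [pvSplit]
  simp [pvConsHead]

theorem pvJoin_cons (sep a : List Char) (ls : List (List Char)) (h : ls ≠ []) :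
    PySem.Chars.join sep (a :: ls) = a ++ sep ++ PySem.Chars.join sep ls := by
  cases ls with
  | nil => exact absurd rfl h
  | cons b t => rw [PySem.Chars.join_cons_cons]

theorem pvJoin_pvSplit (t : List Char) :
    PySem.Chars.join ['\n'] (pvSplit t) = t := by
  induction t using pvSplit.induct with
  | case1 t ih =>
   rw [pvSplit]
   by_cases hd : (t.dropWhile (· != '\n')).isEmpty
   · rw [if_pos hd]
     rw [PySem.Chars.join_singleton]
     have := List.takeWhile_append_dropWhile (p := (· != '\n')) (l := t)
     rw [List.isEmpty_iff] at hd
     rw [hd, List.append_nil] at this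
     exact this
   · rw [if_neg hd]
     have ih := ih hd
     have hne : pvSplit ((t.dropWhile (· != '\n')).drop 1) ≠ [] := by
      rw [pvSplit]; exact List.cons_ne_nil _ _
     rw [pvJoin_cons _ _ _ hne, ih]
     rw [List.isEmpty_iff] at hd
     obtain ⟨x, xs, hx⟩ := List.exists_cons_of_ne_nil hd
     have h9 := List.head_dropWhile_not (p := fun y => y != '\n') (l := t) hd
     have hx' : x = '\n' := by simp [hx] at h9; exact h9
     have hd2 : t.dropWhile (· != '\n') = '\n' :: (t.dropWhile (· != '\n')).drop 1 := by
       rw [hx, hx']; simp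
     rw [List.append_assoc, List.singleton_append, ← hd2, List.takeWhile_append_dropWhile]

theorem pvStrip_nil : PySem.Chars.strip ([] : List Char) = [] := by decide

theorem pvBridge (t : List Char) :
    PySem.Chars.join ['\n'] (pvPopBlank (pvSplit t)) = pvSkipBlankW t := by
  induction t using pvSplit.induct with
  | case1 t ih =>
   rw [pvSplit]
   by_cases hd : (t.dropWhile (· != '\n')).isEmpty
   · rw [if_pos hd]
     rw [List.isEmpty_iff] at hd
     have htw : t.takeWhile (· != '\n') = t := by
       have := List.takeWhile_append_dropWhile (p := (· != '\n')) (l := t)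
       rw [hd, List.append_nil] at this; exact this
     cases t with
     | nil =>
       simp [pvPopBlank, pvSkipBlankW, pvStrip_nil, PySem.Chars.join_nil]
     | cons c cs =>
       rw [pvSkipBlankW]
       by_cases hb : (PySem.Chars.strip ((c :: cs).takeWhile (· != '\n'))).isEmpty
       · rw [if_pos hb]
         rw [hd, List.drop_nil, pvSkipBlankW]
         rw [pvPopBlank, if_pos (by rw [htw] at hb ⊢; exact hb)]
         rw [pvPopBlank, PySem.Chars.join_nil]
       · rw [if_neg hb]
         rw [pvPopBlank, if_neg (by rw [htw] at hb ⊢; exact hb)]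
         rw [PySem.Chars.join_singleton, htw]
   · rw [if_neg hd]
     have ih := ih hd
     have hne : t ≠ [] := by
       intro h'; subst h'; simp at hd
     have hd' := hd
     rw [List.isEmpty_iff] at hd'
     cases t with
     | nil => exact absurd rfl hne
     | cons c cs =>
       rw [pvSkipBlankW]
       by_cases hb : (PySem.Chars.strip ((c :: cs).takeWhile (· != '\n'))).isEmpty
       · rw [if_pos hb]
         rw [pvPopBlank, if_pos hb]
         exact ih
       · rw [if_neg hb]
         rw [pvPopBlank, if_neg hb]
         have h10 : PySem.Chars.join ['\n']
             ((c :: cs).takeWhile (· != '\n') :: pvSplit (((c :: cs).dropWhile (· != '\n')).drop 1))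
             = PySem.Chars.join ['\n'] (pvSplit (c :: cs)) := by
           conv_rhs => rw [pvSplit]
           rw [if_neg hd]
         rw [h10, pvJoin_pvSplit]

theorem pvMarkers (l : List Char) :
    (["telegram draft".toList, "draft".toList, "— draft".toList].any
      (fun m => PySem.Chars.isIn m (PySem.Chars.lower l))) =
    PySem.Chars.isIn "draft".toList (PySem.Chars.lower l) := by
  have hsub1 : "draft".toList <:+: "telegram draft".toList := by decide
  have hsub2 : "draft".toList <:+: "— draft".toList := by decide
  cases hd : PySem.Chars.isIn "draft".toList (PySem.Chars.lower l) with
  | true =>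
    simp only [List.any, Bool.or_eq_true]
    simp
    exact Or.inr (Or.inl hd)
  | false =>
    rw [PySem.Chars.isIn_eq_false_iff] at hd
    have h1 : PySem.Chars.isIn "telegram draft".toList (PySem.Chars.lower l) = false := by
      rw [PySem.Chars.isIn_eq_false_iff]; exact fun h => hd (hsub1.trans h)
    have h2 : PySem.Chars.isIn "— draft".toList (PySem.Chars.lower l) = false := by
      rw [PySem.Chars.isIn_eq_false_iff]; exact fun h => hd (hsub2.trans h)
    have h3 : PySem.Chars.isIn "draft".toList (PySem.Chars.lower l) = false := by
      rw [PySem.Chars.isIn_eq_false_iff]; exact hd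
    simp only [List.any]
    simp
    exact ⟨h1, h3, h2⟩

-- ===== VERDICT (by name: the statement is the Claim_ definition above) =====
theorem pvSkipBlankGo_eq : ∀ (fuel : Nat) (t : List Char), t.length < fuel →
    pvSkipBlankGo fuel t = pvSkipBlankW t := by
  intro fuel
  induction fuel with
  | zero => intro t h; omega
  | succ n ih =>
    intro t h
    cases t with
    | nil => rw [pvSkipBlankW]; simp [pvSkipBlankGo]
    | cons c cs =>
      rw [pvSkipBlankGo, pvSkipBlankW]
      by_cases hb : (PySem.Chars.strip ((c :: cs).takeWhile (· != '\n'))).isEmpty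
      · rw [if_pos hb, if_pos hb]
        refine ih _ ?_
        have hdw := List.length_dropWhile_le (fun x => x != '\n') (c :: cs)
        simp only [List.length_drop, List.length_cons] at *
        omega
      · rw [if_neg hb, if_neg hb]

theorem pvSkipBlank_eq (t : List Char) : pvSkipBlank t = pvSkipBlankW t :=
  pvSkipBlankGo_eq _ _ (by omega)

theorem strip_draft_header_spec : Claim_equal_strip_draft_header := by
  intro body _
  unfold Spec_strip_draft_header strip_draft_header strip_draft_header_alt
  simp only [pvSplitOn_eq]
  rw [pvSplit]
  simp only [List.isEmpty_cons, Bool.false_eq_true, if_false, List.head!_cons, List.tail_cons,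
    pvMarkers]
  have hT : String.ofList (PySem.Chars.join ['\n'] (pvPopBlank
      (if ((PySem.Chars.strip body.toList).dropWhile (· != '\n')).isEmpty then []
       else pvSplit (((PySem.Chars.strip body.toList).dropWhile (· != '\n')).drop 1))))
      = String.ofList (pvSkipBlank (((PySem.Chars.strip body.toList).dropWhile (· != '\n')).drop 1)) := by
    by_cases hd : ((PySem.Chars.strip body.toList).dropWhile (· != '\n')).isEmpty
    · rw [if_pos hd]
      rw [List.isEmpty_iff] at hd
      rw [hd]
      simp [pvPopBlank, pvSkipBlank, pvSkipBlankGo, PySem.Chars.join_nil]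
    · rw [if_neg hd, pvBridge, ← pvSkipBlank_eq]
  rw [hT]
  cases hS : PySem.Chars.startswith ((PySem.Chars.strip body.toList).takeWhile (· != '\n')) ['#'] <;>
    cases hC : PySem.Chars.isIn "draft".toList
        (PySem.Chars.lower ((PySem.Chars.strip body.toList).takeWhile (· != '\n'))) <;>
      simp [hS, hC]
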